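-- pv_equiv track=rewrite | github.com/AKojtek/AISDI2021L | 5. Grafy/dijkstra.py | prepare_dictionary
-- ===== SOURCE A (Python) =====
-- def prepare_dictionary(values_list, size):
--     map_size = size*size
--     dictionary = dict.fromkeys(range(map_size), None)
--     for i in range(map_size):
--         key_dictionary = {}
--         # Check distance to each neighbour
--         # Left
--         if i-1 >= 0 and i % size != 0:
--             key_dictionary[i-1] = values_list[i-1]
--
--         # Top
--         if i-size >= 0:
--             key_dictionary[i-size] = values_list[i-size]
--
--         # Right
--         if i+1 < map_size and i % size != size-1:
--             key_dictionary[i+1] = values_list[i+1]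
--
--         # Bottom
--         if i + size < map_size:
--             key_dictionary[i+size] = values_list[i+size]
--
--         dictionary[i] = key_dictionary
--
--     return dictionary
-- ===== SOURCE B (Python) =====
-- def prepare_dictionary(values_list, size):
--     map_size = size * size
--     dictionary = {i: {} for i in range(map_size)}
--     # edge-centric pass: each cell links back to its LEFT and TOP neighbour,
--     # writing BOTH directions of the edge at once (weight = destination cell's value)
--     for i in range(map_size):
--         if i % size != 0:        # left neighbour exists
--             dictionary[i][i - 1] = values_list[i - 1]
--             dictionary[i - 1][i] = values_list[i]
--         if i - size >= 0:        # top neighbour exists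
--             dictionary[i][i - size] = values_list[i - size]
--             dictionary[i - size][i] = values_list[i]
--     return dictionary
-- ===== Notes on version B (the rewrite author's own statement) =====
-- stated objective: alternative
-- what changed: B is edge-centric instead of cell-centric: it initializes every cell with an empty dict and then, in one pass, for each cell only tests its LEFT and TOP neighbour and writes both directions of that edge at once, instead of A's per-cell collection of all four neighbours.
-- outside the precondition, e.g. on prepare_dictionary([1, 2], -1): A returns {0: {1: 2, -1: 2}}, B raises KeyError
import Mathlib
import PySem

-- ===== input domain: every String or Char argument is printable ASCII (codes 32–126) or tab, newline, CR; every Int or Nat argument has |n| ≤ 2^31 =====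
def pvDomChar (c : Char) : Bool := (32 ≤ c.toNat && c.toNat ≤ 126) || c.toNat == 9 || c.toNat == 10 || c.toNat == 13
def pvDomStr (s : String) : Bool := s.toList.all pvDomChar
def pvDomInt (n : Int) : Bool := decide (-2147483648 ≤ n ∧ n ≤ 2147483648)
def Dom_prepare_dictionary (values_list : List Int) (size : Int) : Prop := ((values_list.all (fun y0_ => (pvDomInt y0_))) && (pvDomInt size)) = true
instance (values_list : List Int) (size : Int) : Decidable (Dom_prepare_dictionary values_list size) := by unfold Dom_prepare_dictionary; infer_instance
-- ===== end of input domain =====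

-- B is edge-centric instead of cell-centric: one pass testing only the LEFT and TOP neighbour of
-- each cell and writing both directions of the edge at once; objective: alternative decomposition.

-- ===== PORT A =====
def prepare_dictionary (values_list : List Int) (size : Int) : List (Int × List (Int × Int)) :=
  let map_size := size * size
  -- dict.fromkeys(range(map_size), None): the None placeholder is ported as [];
  -- it is never observable, since the loop below overwrites every key before return
  let dictionary : PySem.Dict Int (List (Int × Int)) :=
    PySem.Dict.mk ((PySem.List.pyRange 0 map_size).map (fun i => (i, ([] : List (Int × Int)))))
  let final := (PySem.List.pyRange 0 map_size).foldl (fun dictionary i =>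
    let key_dictionary : PySem.Dict Int Int := PySem.Dict.empty
    -- Left  (values_list[i-1] etc.: PyGetD's default is never taken inside Pre_)
    let key_dictionary := if 0 ≤ i - 1 ∧ PySem.Int.mod i size ≠ 0 then
        key_dictionary.insert (i - 1) (PySem.List.pyGetD values_list (i - 1) 0) else key_dictionary
    -- Top
    let key_dictionary := if 0 ≤ i - size then
        key_dictionary.insert (i - size) (PySem.List.pyGetD values_list (i - size) 0) else key_dictionary
    -- Right
    let key_dictionary := if i + 1 < map_size ∧ PySem.Int.mod i size ≠ size - 1 then
        key_dictionary.insert (i + 1) (PySem.List.pyGetD values_list (i + 1) 0) else key_dictionary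
    -- Bottom
    let key_dictionary := if i + size < map_size then
        key_dictionary.insert (i + size) (PySem.List.pyGetD values_list (i + size) 0) else key_dictionary
    dictionary.insert i key_dictionary.items) dictionary
  final.items

-- ===== PORT B =====
-- dictionary[i][j] = v on a dict of dicts: ported as modify (inside Pre_ the key i is always
-- present — all keys of range(map_size) were created first — so modify's default is never taken)
def prepare_dictionary_alt (values_list : List Int) (size : Int) : List (Int × List (Int × Int)) :=
  let map_size := size * size
  let dictionary : PySem.Dict Int (PySem.Dict Int Int) :=
    PySem.Dict.mk ((PySem.List.pyRange 0 map_size).map (fun i => (i, PySem.Dict.empty)))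
  let final := (PySem.List.pyRange 0 map_size).foldl (fun d i =>
    -- left neighbour exists: write both directions of the edge
    let d := if PySem.Int.mod i size ≠ 0 then
        let d := d.modify i PySem.Dict.empty
          (fun inner => inner.insert (i - 1) (PySem.List.pyGetD values_list (i - 1) 0))
        d.modify (i - 1) PySem.Dict.empty
          (fun inner => inner.insert i (PySem.List.pyGetD values_list i 0))
      else d
    -- top neighbour exists: write both directions of the edge
    let d := if 0 ≤ i - size then
        let d := d.modify i PySem.Dict.empty
          (fun inner => inner.insert (i - size) (PySem.List.pyGetD values_list (i - size) 0))
        d.modify (i - size) PySem.Dict.empty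
          (fun inner => inner.insert i (PySem.List.pyGetD values_list i 0))
      else d
    d) dictionary
  final.items.map (fun p => (p.1, p.2.items))

-- ===== PRECONDITION & SPEC =====
-- Pre_ excludes (a) negative size, where A returns a value built from Python's negative-index
-- wraparound while B raises KeyError (B's backward edge i-size points outside the dict), and
-- (b) lists too short for size ≥ 2, where both programs raise IndexError.
def Pre_prepare_dictionary (values_list : List Int) (size : Int) : Prop :=
  0 ≤ size ∧ (2 ≤ size → size * size ≤ (values_list.length : Int))
instance (values_list : List Int) (size : Int) : Decidable (Pre_prepare_dictionary values_list size) := by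
  unfold Pre_prepare_dictionary; infer_instance

def pvWitness_prepare_dictionary : List Int × Int := ([1, 2, 3, 4], 2)

def Spec_prepare_dictionary (values_list : List Int) (size : Int) (out : List (Int × List (Int × Int))) : Prop :=
  out = prepare_dictionary_alt values_list size
instance (values_list : List Int) (size : Int) (out : List (Int × List (Int × Int))) : Decidable (Spec_prepare_dictionary values_list size out) := by
  unfold Spec_prepare_dictionary; infer_instance

-- ===== CLAIM (what is proved, stated in full; the proofs are below) =====
def Claim_equal_prepare_dictionary : Prop := ∀ (values_list : List Int) (size : Int), Dom_prepare_dictionary values_list size → Pre_prepare_dictionary values_list size → Spec_prepare_dictionary values_list size (prepare_dictionary values_list size)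

-- ===== LEMMAS AND PROOFS =====

-- A's inner per-cell dict, as a function of the flat index (definitionally A's loop body)
def keyA (values_list : List Int) (size i : Int) : List (Int × Int) :=
  let map_size := size * size
  let key_dictionary : PySem.Dict Int Int := PySem.Dict.empty
  let key_dictionary := if 0 ≤ i - 1 ∧ PySem.Int.mod i size ≠ 0 then
      key_dictionary.insert (i - 1) (PySem.List.pyGetD values_list (i - 1) 0) else key_dictionary
  let key_dictionary := if 0 ≤ i - size then
      key_dictionary.insert (i - size) (PySem.List.pyGetD values_list (i - size) 0) else key_dictionary
  let key_dictionary := if i + 1 < map_size ∧ PySem.Int.mod i size ≠ size - 1 then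
      key_dictionary.insert (i + 1) (PySem.List.pyGetD values_list (i + 1) 0) else key_dictionary
  let key_dictionary := if i + size < map_size then
      key_dictionary.insert (i + size) (PySem.List.pyGetD values_list (i + size) 0) else key_dictionary
  key_dictionary.items

-- overwriting every key of a dict whose items are exactly the loop's keys, in loop order
theorem fold_insert_items (f : Int → List (Int × Int)) :
    ∀ (l : List Int) (pre : List (Int × List (Int × Int))) (g : Int → List (Int × Int)),
      l.Nodup → (∀ j ∈ l, ∀ p ∈ pre, p.1 ≠ j) →
      (l.foldl (fun d i => PySem.Dict.insert d i (f i))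
          (PySem.Dict.mk (pre ++ l.map (fun j => (j, g j))))).items
        = pre ++ l.map (fun j => (j, f j))
  | [], pre, g, _, _ => by simp
  | i :: t, pre, g, hnd, hpre => by
    have hmem : i ∈ t → False := by
      intro h; exact (List.nodup_cons.mp hnd).1 h
    have hcontains :
        (PySem.Dict.mk (pre ++ (i :: t).map (fun j => (j, g j)))).contains i = true := by
      simp [PySem.Dict.contains_mk]
    have hstep :
        PySem.Dict.insert (PySem.Dict.mk (pre ++ (i :: t).map (fun j => (j, g j)))) i (f i)
          = PySem.Dict.mk ((pre ++ [(i, f i)]) ++ t.map (fun j => (j, g j))) := by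
      apply PySem.Dict.ext
      rw [PySem.Dict.items_insert_of_contains _ _ hcontains]
      show ((pre ++ (i :: t).map (fun j => (j, g j))).map
          (fun p => if (p.1 == i) = true then (i, f i) else p)) = _
      rw [List.map_append, List.map_cons, List.map_cons, List.map_map]
      have h1 : pre.map (fun p => if (p.1 == i) = true then (i, f i) else p) = pre := by
        conv_rhs => rw [← List.map_id pre]
        apply List.map_congr_left
        intro p hp
        simp only [id]
        rw [if_neg (by simpa using hpre i (by simp) p hp)]
      have h2 : t.map ((fun p => if (p.1 == i) = true then (i, f i) else p) ∘ (fun j => (j, g j)))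
          = t.map (fun j => (j, g j)) := by
        apply List.map_congr_left
        intro j hj
        have hne : j ≠ i := fun h => hmem (h ▸ hj)
        simp only [Function.comp_apply]
        rw [if_neg (by simpa using hne)]
      rw [h1, h2]
      simp
    rw [List.foldl_cons, hstep,
      fold_insert_items f t (pre ++ [(i, f i)]) g (List.nodup_cons.mp hnd).2
        (by
          intro j hj p hp
          rcases List.mem_append.mp hp with h | h
          · exact hpre j (List.mem_cons_of_mem _ hj) p h
          · simp only [List.mem_singleton] at h
            subst h
            show i ≠ j
            intro hij
            exact hmem (by rw [hij]; exact hj))]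
    simp

theorem A_items (values_list : List Int) (size : Int) :
    prepare_dictionary values_list size
      = (PySem.List.pyRange 0 (size * size)).map (fun j => (j, keyA values_list size j)) := by
  show ((PySem.List.pyRange 0 (size * size)).foldl
      (fun d i => PySem.Dict.insert d i (keyA values_list size i))
      (PySem.Dict.mk ([] ++ (PySem.List.pyRange 0 (size * size)).map (fun j => (j, (fun _ => ([] : List (Int × Int))) j))))).items
    = _
  rw [fold_insert_items (keyA values_list size) _ [] _ (PySem.List.nodup_pyRange_one 0 (size * size))
    (by intro j _ p hp; simp at hp)]
  simp

-- ---------- B side ----------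

theorem mod_succ_iff (n j : Nat) (hn : 0 < n) : (j + 1) % n = 0 ↔ j % n = n - 1 := by
  rw [← Nat.dvd_iff_mod_eq_zero]
  constructor
  · rintro ⟨c, hc⟩
    rcases c with _ | c
    · omega
    · have hj : j = n * c + (n - 1) := by rw [Nat.mul_succ] at hc; omega
      rw [hj, Nat.mul_add_mod, Nat.mod_eq_of_lt (by omega)]
  · intro h
    have hdm := Nat.div_add_mod j n
    exact ⟨j / n + 1, by rw [Nat.mul_succ]; omega⟩

def innerD (v : List Int) (n j k : Nat) : PySem.Dict Int Int :=
  let d : PySem.Dict Int Int := PySem.Dict.empty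
  let d := if j < k ∧ j % n ≠ 0 then
      d.insert ((j : Int) - 1) (PySem.List.pyGetD v ((j : Int) - 1) 0) else d
  let d := if j < k ∧ n ≤ j then
      d.insert ((j : Int) - (n : Int)) (PySem.List.pyGetD v ((j : Int) - (n : Int)) 0) else d
  let d := if j + 1 < k ∧ (j + 1) % n ≠ 0 then
      d.insert ((j : Int) + 1) (PySem.List.pyGetD v ((j : Int) + 1) 0) else d
  let d := if j + n < k then
      d.insert ((j : Int) + (n : Int)) (PySem.List.pyGetD v ((j : Int) + (n : Int)) 0) else d
  d

theorem innerD_untouched (v : List Int) (n j k : Nat) (h1 : j ≠ k)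
    (h2 : j + 1 = k → k % n = 0) (h3 : j + n ≠ k) :
    innerD v n j (k + 1) = innerD v n j k := by
  have e1 : (j < k + 1 ∧ j % n ≠ 0) ↔ (j < k ∧ j % n ≠ 0) := by omega
  have e2 : (j < k + 1 ∧ n ≤ j) ↔ (j < k ∧ n ≤ j) := by omega
  have e3 : (j + 1 < k + 1 ∧ (j + 1) % n ≠ 0) ↔ (j + 1 < k ∧ (j + 1) % n ≠ 0) := by
    by_cases hjk : j + 1 = k
    · have : (j + 1) % n = 0 := by rw [hjk]; exact h2 hjk
      simp [this]
    · omega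
  have e4 : (j + n < k + 1) ↔ (j + n < k) := by omega
  unfold innerD
  simp only [eq_iff_iff.mpr e1, eq_iff_iff.mpr e2, eq_iff_iff.mpr e3, eq_iff_iff.mpr e4]

theorem innerD_self (v : List Int) (n k : Nat) (hn : 0 < n) :
    innerD v n k (k + 1) =
      (let d : PySem.Dict Int Int := PySem.Dict.empty
       let d := if k % n ≠ 0 then
           d.insert ((k : Int) - 1) (PySem.List.pyGetD v ((k : Int) - 1) 0) else d
       if n ≤ k then
           d.insert ((k : Int) - (n : Int)) (PySem.List.pyGetD v ((k : Int) - (n : Int)) 0) else d) := by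
  have e1 : (k < k + 1 ∧ k % n ≠ 0) ↔ (k % n ≠ 0) := by omega
  have e2 : (k < k + 1 ∧ n ≤ k) ↔ (n ≤ k) := by omega
  have e3 : (k + 1 < k + 1 ∧ (k + 1) % n ≠ 0) ↔ False := iff_false_intro (by omega)
  have e4 : (k + n < k + 1) ↔ False := iff_false_intro (by omega)
  unfold innerD
  simp only [eq_iff_iff.mpr e1, eq_iff_iff.mpr e2, eq_iff_iff.mpr e3, eq_iff_iff.mpr e4,
    if_false]

theorem innerD_left (v : List Int) (n k : Nat) (hn : 0 < n) (hmod : k % n ≠ 0) (hk1 : 1 ≤ k) :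
    innerD v n (k - 1) (k + 1)
      = (innerD v n (k - 1) k).insert (((k - 1 : Nat) : Int) + 1)
          (PySem.List.pyGetD v (((k - 1 : Nat) : Int) + 1) 0) := by
  have hn2 : 2 ≤ n := by
    have : n ≠ 1 := fun h => hmod (by rw [h]; exact Nat.mod_one k)
    omega
  have e1 : (k - 1 < k + 1 ∧ (k - 1) % n ≠ 0) ↔ (k - 1 < k ∧ (k - 1) % n ≠ 0) := by omega
  have e2 : (k - 1 < k + 1 ∧ n ≤ k - 1) ↔ (k - 1 < k ∧ n ≤ k - 1) := by omega
  have hsucc : k - 1 + 1 = k := by omega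
  have e3 : (k - 1 + 1 < k + 1 ∧ (k - 1 + 1) % n ≠ 0) ↔ True :=
    iff_true_intro ⟨by omega, by rw [hsucc]; exact hmod⟩
  have e3' : (k - 1 + 1 < k ∧ (k - 1 + 1) % n ≠ 0) ↔ False := iff_false_intro (by omega)
  have e4 : (k - 1 + n < k + 1) ↔ False := iff_false_intro (by omega)
  have e4' : (k - 1 + n < k) ↔ False := iff_false_intro (by omega)
  unfold innerD
  simp only [eq_iff_iff.mpr e1, eq_iff_iff.mpr e2, eq_iff_iff.mpr e3, eq_iff_iff.mpr e3',
    eq_iff_iff.mpr e4, eq_iff_iff.mpr e4', if_false, if_true]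

theorem innerD_top (v : List Int) (n k : Nat) (hn : 0 < n) (hnk : n ≤ k) :
    innerD v n (k - n) (k + 1)
      = (innerD v n (k - n) k).insert (((k - n : Nat) : Int) + (n : Int))
          (PySem.List.pyGetD v (((k - n : Nat) : Int) + (n : Int)) 0) := by
  have e1 : (k - n < k + 1 ∧ (k - n) % n ≠ 0) ↔ (k - n < k ∧ (k - n) % n ≠ 0) := by omega
  have e2 : (k - n < k + 1 ∧ n ≤ k - n) ↔ (k - n < k ∧ n ≤ k - n) := by omega
  have e3 : (k - n + 1 < k + 1 ∧ (k - n + 1) % n ≠ 0) ↔ (k - n + 1 < k ∧ (k - n + 1) % n ≠ 0) := by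
    by_cases hn1 : n = 1
    · subst hn1; simp [Nat.mod_one]
    · omega
  have e4 : (k - n + n < k + 1) ↔ True := iff_true_intro (by omega)
  have e4' : (k - n + n < k) ↔ False := iff_false_intro (by omega)
  unfold innerD
  simp only [eq_iff_iff.mpr e1, eq_iff_iff.mpr e2, eq_iff_iff.mpr e3,
    eq_iff_iff.mpr e4, eq_iff_iff.mpr e4', if_false, if_true]

theorem innerD_zero (v : List Int) (n j : Nat) : innerD v n j 0 = PySem.Dict.empty := by
  have e1 : (j < 0 ∧ j % n ≠ 0) ↔ False := iff_false_intro (by omega)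
  have e2 : (j < 0 ∧ n ≤ j) ↔ False := iff_false_intro (by omega)
  have e3 : (j + 1 < 0 ∧ (j + 1) % n ≠ 0) ↔ False := iff_false_intro (by omega)
  have e4 : (j + n < 0) ↔ False := iff_false_intro (by omega)
  unfold innerD
  simp only [eq_iff_iff.mpr e1, eq_iff_iff.mpr e2, eq_iff_iff.mpr e3, eq_iff_iff.mpr e4, if_false]

theorem innerD_at_self (v : List Int) (n k : Nat) : innerD v n k k = PySem.Dict.empty := by
  have e1 : (k < k ∧ k % n ≠ 0) ↔ False := iff_false_intro (by omega)
  have e2 : (k < k ∧ n ≤ k) ↔ False := iff_false_intro (by omega)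
  have e3 : (k + 1 < k ∧ (k + 1) % n ≠ 0) ↔ False := iff_false_intro (by omega)
  have e4 : (k + n < k) ↔ False := iff_false_intro (by omega)
  unfold innerD
  simp only [eq_iff_iff.mpr e1, eq_iff_iff.mpr e2, eq_iff_iff.mpr e3, eq_iff_iff.mpr e4, if_false]


theorem innerD_self_both (v : List Int) (n k : Nat) (hn : 0 < n) (h1 : k % n ≠ 0) (h2 : n ≤ k) :
    innerD v n k (k + 1)
      = (PySem.Dict.empty.insert (((k - 1 : Nat)) : Int) (PySem.List.pyGetD v (((k - 1 : Nat)) : Int) 0)).insert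
          (((k - n : Nat)) : Int) (PySem.List.pyGetD v (((k - n : Nat)) : Int) 0) := by
  have hk1 : 1 ≤ k := by
    rcases Nat.eq_zero_or_pos k with h | h
    · exact absurd (h ▸ Nat.zero_mod n) h1
    · exact h
  rw [innerD_self v n k hn]
  simp only [eq_iff_iff.mpr (iff_true_intro h1), eq_iff_iff.mpr (iff_true_intro h2), if_true]
  rw [show ((k : Int) - 1) = (((k - 1 : Nat)) : Int) by omega,
    show ((k : Int) - (n : Int)) = (((k - n : Nat)) : Int) by omega]

theorem innerD_self_left (v : List Int) (n k : Nat) (hn : 0 < n) (h1 : k % n ≠ 0) (h2 : ¬ n ≤ k) :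
    innerD v n k (k + 1)
      = PySem.Dict.empty.insert (((k - 1 : Nat)) : Int) (PySem.List.pyGetD v (((k - 1 : Nat)) : Int) 0) := by
  have hk1 : 1 ≤ k := by
    rcases Nat.eq_zero_or_pos k with h | h
    · exact absurd (h ▸ Nat.zero_mod n) h1
    · exact h
  rw [innerD_self v n k hn]
  simp only [eq_iff_iff.mpr (iff_true_intro h1), eq_iff_iff.mpr (iff_false_intro h2),
    if_true, if_false]
  rw [show ((k : Int) - 1) = (((k - 1 : Nat)) : Int) by omega]

theorem innerD_self_top (v : List Int) (n k : Nat) (hn : 0 < n) (h1 : ¬ k % n ≠ 0) (h2 : n ≤ k) :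
    innerD v n k (k + 1)
      = PySem.Dict.empty.insert (((k - n : Nat)) : Int) (PySem.List.pyGetD v (((k - n : Nat)) : Int) 0) := by
  rw [innerD_self v n k hn]
  simp only [eq_iff_iff.mpr (iff_false_intro h1), eq_iff_iff.mpr (iff_true_intro h2),
    if_true, if_false]
  rw [show ((k : Int) - (n : Int)) = (((k - n : Nat)) : Int) by omega]

theorem innerD_self_none (v : List Int) (n k : Nat) (hn : 0 < n) (h1 : ¬ k % n ≠ 0) (h2 : ¬ n ≤ k) :
    innerD v n k (k + 1) = PySem.Dict.empty := by
  rw [innerD_self v n k hn]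
  simp only [eq_iff_iff.mpr (iff_false_intro h1), eq_iff_iff.mpr (iff_false_intro h2), if_false]

theorem modify_mk_range {α : Type} (m : Nat) (g : Nat → α) (t : Nat) (ht : t < m)
    (d0 : α) (f : α → α) :
    (PySem.Dict.mk ((List.range m).map (fun (j : Nat) => ((j : Int), g j)))).modify (t : Int) d0 f
      = PySem.Dict.mk ((List.range m).map (fun (j : Nat) => ((j : Int), if j = t then f (g j) else g j))) := by
  have hmem : ((t : Int), g t) ∈ (PySem.Dict.mk ((List.range m).map (fun (j : Nat) => ((j : Int), g j)))).items :=
    List.mem_map.mpr ⟨t, List.mem_range.mpr ht, rfl⟩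
  have hnd : ((PySem.Dict.mk ((List.range m).map (fun (j : Nat) => ((j : Int), g j)))).keys).Nodup := by
    simp only [PySem.Dict.keys_mk, List.map_map]
    exact List.nodup_range.map (fun a b h => by simpa using h)
  have hgetD := PySem.Dict.getD_of_mem_items _ hmem hnd (d0 := d0)
  have hcontains : (PySem.Dict.mk ((List.range m).map (fun (j : Nat) => ((j : Int), g j)))).contains (t : Int) = true := by
    simp [PySem.Dict.contains_mk]
    exact ht
  show (PySem.Dict.mk ((List.range m).map (fun (j : Nat) => ((j : Int), g j)))).insert (t : Int)
      (f ((PySem.Dict.mk ((List.range m).map (fun (j : Nat) => ((j : Int), g j)))).getD (t : Int) d0)) = _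
  rw [hgetD]
  apply PySem.Dict.ext
  rw [PySem.Dict.items_insert_of_contains _ _ hcontains]
  show ((List.range m).map (fun (j : Nat) => ((j : Int), g j))).map
      (fun p => if (p.1 == (t : Int)) = true then ((t : Int), f (g t)) else p) = _
  rw [List.map_map]
  apply List.map_congr_left
  intro j hj
  simp only [Function.comp_apply]
  by_cases h : j = t
  · subst h; simp
  · rw [if_neg (by simpa using fun hh => h (by exact_mod_cast hh)), if_neg h]

def stateB (v : List Int) (n k : Nat) : PySem.Dict Int (PySem.Dict Int Int) :=
  PySem.Dict.mk ((List.range (n * n)).map (fun (j : Nat) => ((j : Int), innerD v n j k)))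

def stepB (v : List Int) (size : Int) (d : PySem.Dict Int (PySem.Dict Int Int)) (i : Int) :
    PySem.Dict Int (PySem.Dict Int Int) :=
  let d := if PySem.Int.mod i size ≠ 0 then
      let d := d.modify i PySem.Dict.empty
        (fun inner => inner.insert (i - 1) (PySem.List.pyGetD v (i - 1) 0))
      d.modify (i - 1) PySem.Dict.empty
        (fun inner => inner.insert i (PySem.List.pyGetD v i 0))
    else d
  let d := if 0 ≤ i - size then
      let d := d.modify i PySem.Dict.empty
        (fun inner => inner.insert (i - size) (PySem.List.pyGetD v (i - size) 0))
      d.modify (i - size) PySem.Dict.empty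
        (fun inner => inner.insert i (PySem.List.pyGetD v i 0))
    else d
  d

theorem step_inv (v : List Int) (n k : Nat) (hk : k < n * n) :
    stepB v (n : Int) (stateB v n k) (k : Int) = stateB v n (k + 1) := by
  have hn : 0 < n := by
    rcases Nat.eq_zero_or_pos n with h | h
    · subst h; simp at hk
    · exact h
  have hmod : PySem.Int.mod (k : Int) (n : Int) = ((k % n : Nat) : Int) := by
    rw [PySem.Int.mod_eq_emod_of_pos (by exact_mod_cast hn)]
    push_cast
    rfl
  have hc1 : (PySem.Int.mod (k : Int) (n : Int) ≠ 0) ↔ (k % n ≠ 0) := by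
    rw [hmod]; omega
  have hc2 : (0 ≤ (k : Int) - (n : Int)) ↔ (n ≤ k) := by omega
  unfold stepB stateB
  simp only [eq_iff_iff.mpr hc1, eq_iff_iff.mpr hc2]
  by_cases h1 : k % n ≠ 0 <;> by_cases h2 : n ≤ k
  -- case: left and top both fire
  · have hk1 : 1 ≤ k := by
      rcases Nat.eq_zero_or_pos k with h | h
      · exact absurd (h ▸ Nat.zero_mod n) h1
      · exact h
    have hn2 : 2 ≤ n := by
      have : n ≠ 1 := fun h => h1 (by rw [h]; exact Nat.mod_one k)
      omega
    rw [if_pos h1, if_pos h2]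
    rw [show ((k : Int) - 1) = (((k - 1 : Nat)) : Int) by omega]
    rw [show ((k : Int) - (n : Int)) = (((k - n : Nat)) : Int) by omega]
    rw [modify_mk_range (n * n) _ k hk]
    rw [modify_mk_range (n * n) _ (k - 1) (by omega)]
    rw [modify_mk_range (n * n) _ k hk]
    rw [modify_mk_range (n * n) _ (k - n) (by omega)]
    apply PySem.Dict.ext
    apply List.map_congr_left
    intro j hj
    have hj' : j < n * n := List.mem_range.mp hj
    congr 1
    by_cases hjk : j = k
    · subst hjk
      rw [if_neg (by omega), if_pos rfl, if_neg (by omega), if_pos rfl,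
        innerD_at_self, innerD_self_both v n j hn h1 h2]
    · by_cases hjl : j = k - 1
      · subst hjl
        rw [if_neg (by omega), if_neg hjk, if_pos rfl, if_neg hjk,
          innerD_left v n k hn h1 hk1,
          show ((k : Int)) = (((k - 1 : Nat)) : Int) + 1 by omega]
      · by_cases hjt : j = k - n
        · subst hjt
          rw [if_pos rfl, if_neg hjk, if_neg hjl, if_neg hjk,
            innerD_top v n k hn h2,
            show ((k : Int)) = (((k - n : Nat)) : Int) + (n : Int) by omega]
        · rw [if_neg hjt, if_neg hjk, if_neg hjl, if_neg hjk,
            innerD_untouched v n j k hjk (fun h => absurd (by omega : j = k - 1) hjl)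
              (by omega)]
  -- case: left fires, top does not
  · rw [if_pos h1, if_neg h2]
    have hk1 : 1 ≤ k := by
      rcases Nat.eq_zero_or_pos k with h | h
      · exact absurd (h ▸ Nat.zero_mod n) h1
      · exact h
    rw [show ((k : Int) - 1) = (((k - 1 : Nat)) : Int) by omega]
    rw [modify_mk_range (n * n) _ k hk]
    rw [modify_mk_range (n * n) _ (k - 1) (by omega)]
    apply PySem.Dict.ext
    apply List.map_congr_left
    intro j hj
    have hj' : j < n * n := List.mem_range.mp hj
    congr 1
    by_cases hjk : j = k
    · subst hjk
      rw [if_neg (by omega), if_pos rfl,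
        innerD_at_self, innerD_self_left v n j hn h1 h2]
    · by_cases hjl : j = k - 1
      · subst hjl
        rw [if_pos rfl, if_neg hjk,
          innerD_left v n k hn h1 hk1,
          show ((k : Int)) = (((k - 1 : Nat)) : Int) + 1 by omega]
      · rw [if_neg hjl, if_neg hjk,
          innerD_untouched v n j k hjk (fun h => absurd (by omega : j = k - 1) hjl)
            (by omega)]
  -- case: top fires, left does not
  · rw [if_neg h1, if_pos h2]
    rw [show ((k : Int) - (n : Int)) = (((k - n : Nat)) : Int) by omega]
    rw [modify_mk_range (n * n) _ k hk]
    rw [modify_mk_range (n * n) _ (k - n) (by omega)]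
    apply PySem.Dict.ext
    apply List.map_congr_left
    intro j hj
    have hj' : j < n * n := List.mem_range.mp hj
    congr 1
    have h1' : k % n = 0 := by omega
    by_cases hjk : j = k
    · subst hjk
      rw [if_neg (by omega), if_pos rfl,
        innerD_at_self, innerD_self_top v n j hn (by omega) h2]
    · by_cases hjt : j = k - n
      · subst hjt
        rw [if_pos rfl, if_neg hjk,
          innerD_top v n k hn h2,
          show ((k : Int)) = (((k - n : Nat)) : Int) + (n : Int) by omega]
      · rw [if_neg hjt, if_neg hjk,
          innerD_untouched v n j k hjk (fun _ => h1') (by omega)]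
  -- case: neither fires
  · rw [if_neg h1, if_neg h2]
    apply PySem.Dict.ext
    apply List.map_congr_left
    intro j hj
    congr 1
    have h1' : k % n = 0 := by omega
    by_cases hjk : j = k
    · subst hjk
      rw [innerD_self_none v n j hn (by omega) h2, innerD_at_self]
    · rw [innerD_untouched v n j k hjk (fun _ => h1') (by omega)]


theorem fold_state (v : List Int) (n : Nat) :
    ∀ k, k ≤ n * n →
      ((List.range k).map (fun (i : Nat) => (i : Int))).foldl (stepB v (n : Int)) (stateB v n 0)
        = stateB v n k := by
  intro k
  induction k with
  | zero => intro _; simp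
  | succ k ih =>
    intro h
    rw [List.range_succ, List.map_append, List.foldl_append, ih (by omega)]
    simpa using step_inv v n k (by omega)

theorem keyA_eq_innerD (v : List Int) (n j : Nat) (hj : j < n * n) :
    keyA v (n : Int) (j : Int) = (innerD v n j (n * n)).items := by
  have hn : 0 < n := by
    rcases Nat.eq_zero_or_pos n with h | h
    · subst h; simp at hj
    · exact h
  have hmod : PySem.Int.mod (j : Int) (n : Int) = ((j % n : Nat) : Int) := by
    rw [PySem.Int.mod_eq_emod_of_pos (by exact_mod_cast hn)]
    push_cast
    rfl
  have c1 : (0 ≤ (j : Int) - 1 ∧ PySem.Int.mod (j : Int) (n : Int) ≠ 0) ↔ (j < n * n ∧ j % n ≠ 0) := by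
    rw [hmod]
    constructor
    · rintro ⟨h1, h2⟩; exact ⟨hj, by omega⟩
    · rintro ⟨_, h2⟩
      have : j ≠ 0 := fun h => h2 (h ▸ Nat.zero_mod n)
      exact ⟨by omega, by omega⟩
  have c2 : (0 ≤ (j : Int) - (n : Int)) ↔ (j < n * n ∧ n ≤ j) := by
    constructor
    · intro h; exact ⟨hj, by omega⟩
    · rintro ⟨_, h⟩; omega
  have c3 : ((j : Int) + 1 < (n : Int) * (n : Int) ∧ PySem.Int.mod (j : Int) (n : Int) ≠ (n : Int) - 1)
      ↔ (j + 1 < n * n ∧ (j + 1) % n ≠ 0) := by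
    rw [hmod]
    have hcast : ((j : Int) + 1 < (n : Int) * (n : Int)) ↔ (j + 1 < n * n) := by
      omega
    have hm : (((j % n : Nat) : Int) = (n : Int) - 1) ↔ (j % n = n - 1) := by omega
    rw [hcast]
    constructor
    · rintro ⟨h1, h2⟩
      exact ⟨h1, fun h => h2 (hm.mpr ((mod_succ_iff n j hn).mp h))⟩
    · rintro ⟨h1, h2⟩
      exact ⟨h1, fun h => h2 ((mod_succ_iff n j hn).mpr (hm.mp h))⟩
  have c4 : ((j : Int) + (n : Int) < (n : Int) * (n : Int)) ↔ (j + n < n * n) := by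
    omega
  unfold keyA innerD
  simp only [eq_iff_iff.mpr c1, eq_iff_iff.mpr c2, eq_iff_iff.mpr c3, eq_iff_iff.mpr c4]

theorem A_eq_B (values_list : List Int) (size : Int) (h : 0 ≤ size) :
    prepare_dictionary values_list size = prepare_dictionary_alt values_list size := by
  obtain ⟨n, rfl⟩ : ∃ n : Nat, size = (n : Int) := ⟨size.toNat, (Int.toNat_of_nonneg h).symm⟩
  have hcast : ((n : Int) * (n : Int)) = ((n * n : Nat) : Int) := by push_cast; ring
  have hrange : PySem.List.pyRange 0 ((n : Int) * (n : Int))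
      = (List.range (n * n)).map (fun (i : Nat) => (i : Int)) := by
    rw [hcast, PySem.List.pyRange_zero_natCast]
  have hB : prepare_dictionary_alt values_list (n : Int)
      = ((PySem.List.pyRange 0 ((n : Int) * (n : Int))).foldl (stepB values_list (n : Int))
          (PySem.Dict.mk ((PySem.List.pyRange 0 ((n : Int) * (n : Int))).map
            (fun i => (i, (PySem.Dict.empty : PySem.Dict Int Int)))))).items.map
          (fun p => (p.1, p.2.items)) := rfl
  have hinit : PySem.Dict.mk ((PySem.List.pyRange 0 ((n : Int) * (n : Int))).map
      (fun i => (i, (PySem.Dict.empty : PySem.Dict Int Int)))) = stateB values_list n 0 := by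
    unfold stateB
    rw [hrange, List.map_map]
    exact congrArg PySem.Dict.mk (List.map_congr_left (fun j _ => by
      simp [innerD_zero]))
  rw [A_items, hB, hinit, hrange, fold_state values_list n (n * n) le_rfl]
  unfold stateB
  show _ = ((List.range (n * n)).map fun (j : Nat) => ((j : Int), innerD values_list n j (n * n))).map
      (fun p => (p.1, p.2.items))
  rw [List.map_map, List.map_map]
  apply List.map_congr_left
  intro j hj
  simp only [Function.comp_apply]
  rw [keyA_eq_innerD values_list n j (List.mem_range.mp hj)]

-- ===== VERDICT (by name: the statement is the Claim_ definition above) =====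
theorem prepare_dictionary_spec : Claim_equal_prepare_dictionary := by
  intro values_list size _ hPre
  exact A_eq_B values_list size hPre.1
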